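-- pv_equiv track=rewrite | github.com/davep777/algorytmy | zadanie_2_30.03.py | szukanie_prefiks
-- ===== SOURCE A (Python) =====
-- def szukanie_prefiks(slowa, prefix):
--     kroki = 0
--     rezultat =[]
--
--     for slowo in slowa:
--         kroki +=1
--         if slowo.startswith(prefix):
--             rezultat.append(slowo)
--             kroki +=1
--
--     return rezultat, kroki
-- ===== SOURCE B (Python) =====
-- def szukanie_prefiks(slowa, prefix):
--     n = len(prefix)
--     stack = list(slowa)      # explicit stack, consumed from the end
--     rezultat = []
--     kroki = 0
--     while stack:
--         w = stack.pop()
--         if w[:n] == prefix: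
--             rezultat.append(w)
--             kroki += 2
--         else:
--             kroki += 1
--     rezultat.reverse()
--     return rezultat, kroki
-- ===== Notes on version B (the rewrite author's own statement) =====
-- stated objective: alternative
-- what changed: Replaces A's forward loop with a threaded (result, counter) accumulator by an explicit stack consumed from the end: pop each word, test the prefix by slice comparison w[:len(prefix)] == prefix instead of startswith, build the result reversed and reverse it at the end.
import Mathlib
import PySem

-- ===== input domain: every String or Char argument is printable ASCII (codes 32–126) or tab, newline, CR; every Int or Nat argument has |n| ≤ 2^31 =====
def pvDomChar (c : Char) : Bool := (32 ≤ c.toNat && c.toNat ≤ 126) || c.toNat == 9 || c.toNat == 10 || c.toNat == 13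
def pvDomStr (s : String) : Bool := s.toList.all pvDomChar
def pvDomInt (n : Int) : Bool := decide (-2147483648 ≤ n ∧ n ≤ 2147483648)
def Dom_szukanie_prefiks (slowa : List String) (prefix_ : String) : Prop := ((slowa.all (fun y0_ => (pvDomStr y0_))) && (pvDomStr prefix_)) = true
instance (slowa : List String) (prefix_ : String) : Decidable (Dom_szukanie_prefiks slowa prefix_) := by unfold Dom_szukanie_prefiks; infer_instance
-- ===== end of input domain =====

-- B replaces A's forward loop with a threaded step counter by a back-to-front recursion that
-- conses matches onto the recursive result and tests the prefix by slice comparison (objective: alternative).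

-- ===== PORT A =====
-- A: forward loop threading (rezultat, kroki); kroki += 1 per word, += 1 more on a startswith match.
def szukanie_prefiks (slowa : List String) (prefix_ : String) : List String × Int :=
  let st := slowa.foldl (fun (acc : List String × Int) slowo =>
    let acc := (acc.1, acc.2 + 1)
    if PySem.Str.startswith slowo prefix_ then (acc.1 ++ [slowo], acc.2 + 1) else acc)
    ([], 0)
  st

-- ===== PORT B =====
-- B: explicit stack popped from the end (= fold over slowa.reverse), slice test w[:n] == prefix,
-- result built reversed and reversed at the end; the while/pop loop is ported as the fold over the reversed list.
def szukanie_prefiks_alt (slowa : List String) (prefix_ : String) : List String × Int :=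
  let n := PySem.Str.len prefix_
  let st := slowa.reverse.foldl (fun (acc : List String × Int) w =>
      if PySem.Str.slice w none (some n) = prefix_ then (acc.1 ++ [w], acc.2 + 2)
      else (acc.1, acc.2 + 1)) ([], 0)
  (st.1.reverse, st.2)

-- ===== PRECONDITION & SPEC =====
def Spec_szukanie_prefiks (slowa : List String) (prefix_ : String) (out : List String × Int) : Prop := out = szukanie_prefiks_alt slowa prefix_
instance (slowa : List String) (prefix_ : String) (out : List String × Int) : Decidable (Spec_szukanie_prefiks slowa prefix_ out) := by unfold Spec_szukanie_prefiks; infer_instance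

-- ===== CLAIM =====
def Claim_equal_szukanie_prefiks : Prop := ∀ (slowa : List String) (prefix_ : String), Dom_szukanie_prefiks slowa prefix_ → Spec_szukanie_prefiks slowa prefix_ (szukanie_prefiks slowa prefix_)

-- ===== LEMMAS AND PROOFS =====

-- w[:len(prefix)] == prefix  is exactly  w.startswith(prefix).
theorem slice_eq_iff_startswith (w prefix_ : String) :
    (PySem.Str.slice w none (some (PySem.Str.len prefix_)) = prefix_)
      ↔ PySem.Str.startswith w prefix_ = true := by
  constructor
  · intro h
    simp [PySem.Chars.startswith_iff]
    have := congrArg String.toList h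
    simp [PySem.Str.toList_slice, PySem.Str.len,
      PySem.List.slice_to_natCast] at this
    exact this ▸ List.take_prefix _ _
  · intro h
    simp [PySem.Chars.startswith_iff] at h
    have hl : (PySem.Str.slice w none (some (PySem.Str.len prefix_))).toList = prefix_.toList := by
      simp [PySem.Str.toList_slice, PySem.Str.len,
        PySem.List.slice_to_natCast]
      exact (List.prefix_iff_eq_take.mp h).symm
    exact String.toList_injective hl

-- B's stack loop, from any accumulator, appends the slice-matching words and adds length + match count.
theorem alt_fold_eq (prefix_ : String) (l : List String) (r : List String) (k : Int) :
    l.foldl (fun (acc : List String × Int) w =>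
      if PySem.Str.slice w none (some (PySem.Str.len prefix_)) = prefix_ then (acc.1 ++ [w], acc.2 + 2)
      else (acc.1, acc.2 + 1)) (r, k)
    = (r ++ l.filter (fun s => PySem.Str.startswith s prefix_),
       k + l.length + (l.filter (fun s => PySem.Str.startswith s prefix_)).length) := by
  induction l generalizing r k with
  | nil => simp
  | cons w t ih =>
    rw [List.foldl_cons, List.filter_cons]
    by_cases hp : PySem.Str.startswith w prefix_ = true
    · rw [if_pos ((slice_eq_iff_startswith w prefix_).mpr hp), if_pos hp, ih]
      refine Prod.ext (by simp) (by simp; ring)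
    · rw [if_neg (fun h => hp ((slice_eq_iff_startswith w prefix_).mp h)), if_neg hp, ih]
      refine Prod.ext (by simp) (by simp; ring)

-- A's fold, started from any accumulator, appends the filtered words and adds length + match count.
theorem szukanie_prefiks_fold (slowa : List String) (prefix_ : String)
    (r : List String) (k : Int) :
    slowa.foldl (fun (acc : List String × Int) slowo =>
      let acc := (acc.1, acc.2 + 1)
      if PySem.Str.startswith slowo prefix_ then (acc.1 ++ [slowo], acc.2 + 1) else acc)
      (r, k)
    = (r ++ slowa.filter (fun s => PySem.Str.startswith s prefix_),
       k + slowa.length + (slowa.filter (fun s => PySem.Str.startswith s prefix_)).length) := by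
  induction slowa generalizing r k with
  | nil => simp
  | cons h t ih =>
    rw [List.foldl_cons, List.filter_cons]
    show List.foldl _ (if PySem.Str.startswith h prefix_ then (r ++ [h], k + 1 + 1) else (r, k + 1)) t = _
    by_cases hp : PySem.Str.startswith h prefix_ = true
    · rw [if_pos hp, if_pos hp, ih]
      refine Prod.ext (by simp) (by simp; ring)
    · rw [if_neg hp, if_neg hp, ih]
      refine Prod.ext (by simp) (by simp; ring)

-- ===== VERDICT =====
theorem szukanie_prefiks_spec : Claim_equal_szukanie_prefiks := by
  intro slowa prefix_ _
  unfold Spec_szukanie_prefiks szukanie_prefiks szukanie_prefiks_alt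
  rw [szukanie_prefiks_fold]
  show _ = ((List.foldl _ ([], 0) slowa.reverse).1.reverse, _)
  rw [alt_fold_eq]
  simp [List.filter_reverse, add_comm]
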